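-- pv_equiv track=rewrite | github.com/stobinaator/Advent-of-Code | 2018/day 2 inventory system/checksum.py | ex_func2
-- ===== SOURCE A (Python) =====
-- from typing import List
-- from collections import Counter
--
-- def ex_func2(example: List[str]) -> int:
--     twos, threes = 0, 0
--     for _id in example:
--         counter_val = Counter(_id)
--         setvals = set(counter_val.values())
--         if 2 in setvals: twos += 1
--         if 3 in setvals: threes += 1
--
--     return twos * threes
-- ===== SOURCE B (Python) =====
-- def _run_lengths(s):
--     # sort the characters, then one scan collecting the length of each maximal run
--     lengths = set()
--     prev, run = None, 0
--     for ch in sorted(s):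
--         if ch == prev:
--             run += 1
--         else:
--             if run:
--                 lengths.add(run)
--             prev, run = ch, 1
--     if run:
--         lengths.add(run)
--     return lengths
--
-- def ex_func2(example):
--     twos, threes = 0, 0
--     for _id in example:
--         lengths = _run_lengths(_id)
--         twos += 2 in lengths
--         threes += 3 in lengths
--     return twos * threes
-- ===== Notes on version B (the rewrite author's own statement) =====
-- stated objective: alternative
-- what changed: Per id B sorts the characters and makes one scan over the sorted string collecting maximal run lengths into a set (no frequency table), instead of A's Counter hash table and set of its values; 2/3 membership in the run-length set replaces membership in Counter.values().
import Mathlib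
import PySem

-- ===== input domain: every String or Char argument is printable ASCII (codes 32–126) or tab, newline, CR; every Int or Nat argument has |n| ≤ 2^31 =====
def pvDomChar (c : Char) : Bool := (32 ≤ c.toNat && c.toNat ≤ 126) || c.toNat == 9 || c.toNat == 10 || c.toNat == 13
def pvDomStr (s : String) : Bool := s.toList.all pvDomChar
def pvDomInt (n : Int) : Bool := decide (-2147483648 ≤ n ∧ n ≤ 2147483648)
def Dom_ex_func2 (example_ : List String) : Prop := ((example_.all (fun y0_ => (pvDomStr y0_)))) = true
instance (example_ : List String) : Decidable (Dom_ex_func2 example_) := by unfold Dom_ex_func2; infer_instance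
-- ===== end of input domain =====

-- B replaces the per-id Counter table with a sort of the id's characters followed by one
-- scan collecting maximal run lengths into a set (alternative algorithm, same results).

-- ===== PORT A =====
def ex_func2 (example_ : List String) : Int :=
  let r := example_.foldl (fun st _id =>
    let counter_val := PySem.Dict.counter _id.toList
    let setvals : PySem.Set Int := PySem.Set.ofList counter_val.values
    let twos := if setvals.contains 2 then st.1 + 1 else st.1
    let threes := if setvals.contains 3 then st.2 + 1 else st.2
    (twos, threes)) ((0 : Int), (0 : Int))
  r.1 * r.2

-- ===== PORT B =====
-- one step of the scan over the sorted characters; state = (lengths, prev, run)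
def pvStep (st : PySem.Set Int × Option Char × Int) (ch : Char) : PySem.Set Int × Option Char × Int :=
  if some ch == st.2.1 then (st.1, st.2.1, st.2.2 + 1)
  else ((if st.2.2 ≠ 0 then PySem.Set.add st.1 st.2.2 else st.1), some ch, 1)

def pvRunLengths (s : String) : PySem.Set Int :=
  let st := (PySem.List.sorted s.toList (fun c => c) false).foldl pvStep (PySem.Set.empty, none, 0)
  if st.2.2 ≠ 0 then PySem.Set.add st.1 st.2.2 else st.1

def ex_func2_alt (example_ : List String) : Int :=
  let r := example_.foldl (fun st _id =>
    let lengths := pvRunLengths _id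
    (st.1 + (if lengths.contains 2 then 1 else 0),
     st.2 + (if lengths.contains 3 then 1 else 0))) ((0 : Int), (0 : Int))
  r.1 * r.2

-- ===== PRECONDITION & SPEC =====
def Spec_ex_func2 (example_ : List String) (out : Int) : Prop := out = ex_func2_alt example_
instance (example_ : List String) (out : Int) : Decidable (Spec_ex_func2 example_ out) := by unfold Spec_ex_func2; infer_instance

-- ===== CLAIM (what is proved, stated in full; the proofs are below) =====
def Claim_equal_ex_func2 : Prop := ∀ (example_ : List String), Dom_ex_func2 example_ → Spec_ex_func2 example_ (ex_func2 example_)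

-- ===== LEMMAS AND PROOFS =====

-- the trailing "if run: lengths.add(run)" of B's scan
def pvFin (st : PySem.Set Int × Option Char × Int) : PySem.Set Int :=
  if st.2.2 ≠ 0 then PySem.Set.add st.1 st.2.2 else st.1

lemma pvRunLengths_eq (s : String) :
    pvRunLengths s = pvFin ((PySem.List.sorted s.toList (fun c => c) false).foldl pvStep (PySem.Set.empty, none, 0)) := rfl

-- invariant of B's scan: over a sorted suffix l whose elements all dominate the current
-- run character p, the final set holds k iff k was there, k closes p's run, or k is the
-- count of some later character
lemma pv_fold (k : Int) (l : List Char) : l.Pairwise (· ≤ ·) →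
    ∀ (p : Char) (r : Int) (S : PySem.Set Int), 0 < r → (∀ c ∈ l, p ≤ c) →
    ((pvFin (l.foldl pvStep (S, some p, r))).contains k = true
      ↔ S.contains k = true ∨ k = r + (l.count p : Int) ∨ ∃ c ∈ l, c ≠ p ∧ (l.count c : Int) = k) := by
  induction l with
  | nil =>
      intro _ p r S hr _
      simp only [List.foldl_nil, pvFin, if_pos hr.ne', PySem.Set.contains_iff,
        PySem.Set.mem_add, List.count_nil, List.not_mem_nil, Int.natCast_zero, add_zero]
      tauto
  | cons x xs ih =>
      intro hpw p r S hr hall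
      have hx : ∀ b ∈ xs, x ≤ b := (List.pairwise_cons.mp hpw).1
      have hxs := (List.pairwise_cons.mp hpw).2
      by_cases hpx : x = p
      · subst hpx
        have hstep : pvStep (S, some x, r) x = (S, some x, r + 1) := by
          simp [pvStep]
        rw [List.foldl_cons, hstep]
        rw [ih hxs x (r + 1) S (by omega) hx]
        constructor
        · rintro (h | h | ⟨c, hc, hcx, hck⟩)
          · exact Or.inl h
          · refine Or.inr (Or.inl ?_)
            simp only [List.count_cons_self]; push_cast; omega
          · refine Or.inr (Or.inr ⟨c, List.mem_cons_of_mem _ hc, hcx, ?_⟩)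
            simpa [List.count_cons, Ne.symm hcx] using hck
        · rintro (h | h | ⟨c, hc, hcx, hck⟩)
          · exact Or.inl h
          · refine Or.inr (Or.inl ?_)
            simp only [List.count_cons_self] at h; push_cast at h ⊢; omega
          · rcases List.mem_cons.mp hc with rfl | hc
            · exact absurd rfl hcx
            · refine Or.inr (Or.inr ⟨c, hc, hcx, ?_⟩)
              simpa [List.count_cons, Ne.symm hcx] using hck
      · have hlt : p < x := lt_of_le_of_ne (hall x (List.mem_cons_self)) (fun h => hpx h.symm)
        have hpnot : ∀ c ∈ xs, c ≠ p := by
          intro c hc; exact ne_of_gt (lt_of_lt_of_le hlt (hx c hc))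
        have hstep : pvStep (S, some p, r) x = (PySem.Set.add S r, some x, 1) := by
          simp [pvStep, hpx, hr.ne']
        rw [List.foldl_cons, hstep]
        rw [ih hxs x 1 (PySem.Set.add S r) one_pos hx]
        have hSr : (PySem.Set.add S r).contains k = true ↔ S.contains k = true ∨ k = r := by
          simp [PySem.Set.mem_add]
        have hpx' : p ≠ x := fun h => hpx h.symm
        have hcount : ((x :: xs).count p : Int) = 0 := by
          have h0 : (x :: xs).count p = 0 :=
            List.count_eq_zero.mpr (by
              intro hmem
              rcases List.mem_cons.mp hmem with h | h
              · exact hpx (h.symm)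
              · exact (hpnot p h) rfl)
          rw [h0]; rfl
        rw [hSr, hcount]
        constructor
        · rintro ((h | h) | h | ⟨c, hc, hcx, hck⟩)
          · exact Or.inl h
          · exact Or.inr (Or.inl (by omega))
          · refine Or.inr (Or.inr ⟨x, List.mem_cons_self, fun hh => hpx' hh.symm, ?_⟩)
            simp only [List.count_cons_self]; push_cast; omega
          · refine Or.inr (Or.inr ⟨c, List.mem_cons_of_mem _ hc, hpnot c hc, ?_⟩)
            simpa [List.count_cons, Ne.symm hcx] using hck
        · rintro (h | h | ⟨c, hc, _, hck⟩)
          · exact Or.inl (Or.inl h)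
          · exact Or.inl (Or.inr (by omega))
          · rcases List.mem_cons.mp hc with rfl | hc
            · refine Or.inr (Or.inl ?_)
              simp only [List.count_cons_self] at hck; push_cast at hck ⊢; omega
            · by_cases hcx2 : c = x
              · subst hcx2
                refine Or.inr (Or.inl ?_)
                simp only [List.count_cons_self] at hck; push_cast at hck ⊢; omega
              · refine Or.inr (Or.inr ⟨c, hc, hcx2, ?_⟩)
                simpa [List.count_cons, Ne.symm hcx2] using hck

-- B's per-id set of run lengths holds k iff some character of the id occurs k times
lemma pv_runLengths_spec (s : String) (k : Int) :
    (pvRunLengths s).contains k = true ↔ ∃ c ∈ s.toList, (s.toList.count c : Int) = k := by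
  rw [pvRunLengths_eq]
  have hperm := PySem.List.sorted_perm s.toList (fun c => c) false
  cases hl : PySem.List.sorted s.toList (fun c => c) false with
  | nil =>
      rw [hl] at hperm
      have hnil : s.toList = [] := hperm.symm.eq_nil
      simp [pvFin, PySem.Set.empty, hnil]
  | cons x xs =>
      rw [hl] at hperm
      have hcnt : ∀ c, (x :: xs).count c = s.toList.count c := fun c => hperm.count_eq c
      have hmem : ∀ c, c ∈ x :: xs ↔ c ∈ s.toList := fun c => hperm.mem_iff
      have hpw : (x :: xs).Pairwise (· ≤ ·) := by
        have h := PySem.List.sorted_pairwise s.toList (fun c => c)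
        rw [hl] at h; exact h
      have hx : ∀ b ∈ xs, x ≤ b := (List.pairwise_cons.mp hpw).1
      have hstep : pvStep (PySem.Set.empty, none, 0) x = (PySem.Set.empty, some x, 1) := by
        simp [pvStep]
      rw [List.foldl_cons, hstep,
        pv_fold k xs (List.pairwise_cons.mp hpw).2 x 1 PySem.Set.empty one_pos hx]
      have hnone : ((PySem.Set.empty : PySem.Set Int).contains k = true) ↔ False := by
        simp [PySem.Set.empty]
      rw [hnone]
      constructor
      · rintro (h | h | ⟨c, hc, hcx, hck⟩)
        · exact absurd h (by simp)
        · refine ⟨x, (hmem x).mp List.mem_cons_self, ?_⟩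
          rw [← hcnt x]
          simp only [List.count_cons_self]; push_cast; omega
        · refine ⟨c, (hmem c).mp (List.mem_cons_of_mem _ hc), ?_⟩
          rw [← hcnt c]
          simpa [List.count_cons, Ne.symm hcx] using hck
      · rintro ⟨c, hc, hck⟩
        rw [← hcnt c] at hck
        by_cases hcx : c = x
        · subst hcx
          refine Or.inr (Or.inl ?_)
          simp only [List.count_cons_self] at hck; push_cast at hck ⊢; omega
        · rcases List.mem_cons.mp ((hmem c).mpr hc) with rfl | hcxs
          · exact absurd rfl hcx
          · refine Or.inr (Or.inr ⟨c, hcxs, hcx, ?_⟩)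
            simpa [List.count_cons, Ne.symm hcx] using hck

-- A's per-id test: k ∈ set(Counter(_id).values()) iff some character occurs k times
lemma pv_counter_spec (s : String) (k : Int) :
    (PySem.Set.ofList (PySem.Dict.counter s.toList).values).contains k = true
      ↔ ∃ c ∈ s.toList, (s.toList.count c : Int) = k := by
  have hv : (PySem.Dict.counter s.toList).values
      = ((PySem.Dict.counter s.toList).items).map (·.2) := rfl
  rw [hv, PySem.Dict.items_counter, List.map_map]
  simp only [PySem.Set.contains_iff, PySem.Set.mem_ofList, List.mem_map, Function.comp]

-- the two per-id tests agree as booleans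
lemma pv_perid (s : String) (k : Int) :
    (PySem.Set.ofList (PySem.Dict.counter s.toList).values).contains k = (pvRunLengths s).contains k := by
  rw [Bool.eq_iff_iff, pv_counter_spec, pv_runLengths_spec]

-- A's accumulator loop in closed form
lemma pv_loopA (l : List String) (p q : String → Bool) (a b : Int) :
    l.foldl (fun st s => (if p s then st.1 + 1 else st.1, if q s then st.2 + 1 else st.2)) (a, b)
      = (a + (l.countP p : Int), b + (l.countP q : Int)) := by
  induction l generalizing a b with
  | nil => simp
  | cons x xs ih =>
      simp only [List.foldl_cons, List.countP_cons, ih]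
      split_ifs <;> simp [Prod.ext_iff] <;> omega

-- B's accumulator loop in closed form
lemma pv_loopB (l : List String) (p q : String → Bool) (a b : Int) :
    l.foldl (fun st s => (st.1 + (if p s then 1 else 0), st.2 + (if q s then 1 else 0))) (a, b)
      = (a + (l.countP p : Int), b + (l.countP q : Int)) := by
  induction l generalizing a b with
  | nil => simp
  | cons x xs ih =>
      simp only [List.foldl_cons, List.countP_cons, ih]
      split_ifs <;> simp [Prod.ext_iff] <;> omega

-- ===== VERDICT (by name: the statement is the Claim_ definition above) =====
theorem ex_func2_spec : Claim_equal_ex_func2 := by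
  intro example_ _
  unfold Spec_ex_func2 ex_func2 ex_func2_alt
  simp only []
  rw [pv_loopA example_
        (fun s => (PySem.Set.ofList (PySem.Dict.counter s.toList).values).contains 2)
        (fun s => (PySem.Set.ofList (PySem.Dict.counter s.toList).values).contains 3),
      pv_loopB example_
        (fun s => (pvRunLengths s).contains 2)
        (fun s => (pvRunLengths s).contains 3)]
  have h2 : List.countP (fun s => (PySem.Set.ofList (PySem.Dict.counter s.toList).values).contains 2) example_
      = List.countP (fun s => (pvRunLengths s).contains 2) example_ :=
    List.countP_congr (fun s _ => by rw [pv_perid s 2])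
  have h3 : List.countP (fun s => (PySem.Set.ofList (PySem.Dict.counter s.toList).values).contains 3) example_
      = List.countP (fun s => (pvRunLengths s).contains 3) example_ :=
    List.countP_congr (fun s _ => by rw [pv_perid s 3])
  rw [h2, h3]
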